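-- pv_equiv track=rewrite | github.com/jongmoonl/rosalind_python | rosalind_ba3e.py | deBruijnGraph
-- ===== SOURCE A (Python) =====
-- def deBruijnGraph(seq):
--     '''
--     Generate De Bruijn Graph from list of kmers and
--     return
--     '''
--     kmerDict = {}
--     for motif in seq:
--         prefix = motif[:-1]
--         suffix = motif[1:]
--         if prefix not in kmerDict:
--             kmerDict[prefix] = []
--             kmerDict[prefix].append(suffix)
--         else:
--             kmerDict[prefix].append(suffix)
--     return kmerDict
-- ===== SOURCE B (Python) =====
-- def deBruijnGraph(seq):
--     '''
--     Generate De Bruijn Graph from list of kmers and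
--     return
--     '''
--     prefixes = list(dict.fromkeys(m[:-1] for m in seq))
--     return {p: [m[1:] for m in seq if m[:-1] == p] for p in prefixes}
-- ===== Notes on version B (the rewrite author's own statement) =====
-- stated objective: alternative
-- what changed: Replaces the single-pass insert-or-append dict mutation with a two-pass grouped comprehension: first dedup the prefixes in first-occurrence order, then gather each prefix's suffixes by scanning the kmer list.
import Mathlib
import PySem

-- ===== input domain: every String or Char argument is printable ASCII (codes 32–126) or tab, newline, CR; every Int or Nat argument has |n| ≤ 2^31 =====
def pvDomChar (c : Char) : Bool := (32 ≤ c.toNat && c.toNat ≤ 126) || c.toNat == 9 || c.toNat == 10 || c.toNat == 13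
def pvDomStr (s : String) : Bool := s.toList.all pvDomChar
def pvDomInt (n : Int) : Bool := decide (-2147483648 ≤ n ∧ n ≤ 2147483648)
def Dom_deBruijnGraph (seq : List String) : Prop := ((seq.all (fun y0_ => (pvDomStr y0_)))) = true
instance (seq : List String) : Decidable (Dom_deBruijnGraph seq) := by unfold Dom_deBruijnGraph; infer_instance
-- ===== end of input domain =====

-- B replaces A's single-pass insert-or-append dict mutation by a two-pass grouped
-- comprehension (dedup the prefixes, then gather suffixes per prefix); alternative
-- decomposition, same return value.

-- ===== PORT A =====
-- A's loop: for each motif, if its prefix is not a key yet, insert an empty list,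
-- then (in either branch) append the suffix to the prefix's list.
def deBruijnGraph (seq : List String) : List (String × List String) :=
  (seq.foldl (fun d motif =>
      let pre := PySem.Str.slice motif none (some (-1))
      let suf := PySem.Str.slice motif (some 1) none
      if !(d.contains pre) then
        ((d.insert pre ([] : List String)).modify pre [] (fun l => l ++ [suf]))
      else
        d.modify pre [] (fun l => l ++ [suf]))
    PySem.Dict.empty).items

-- ===== PORT B =====
def deBruijnGraph_alt (seq : List String) : List (String × List String) :=
  (PySem.List.dedup (seq.map (fun m => PySem.Str.slice m none (some (-1))))).map
    (fun p => (p,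
      (seq.filter (fun m => PySem.Str.slice m none (some (-1)) == p)).map
        (fun m => PySem.Str.slice m (some 1) none)))

-- ===== PRECONDITION & SPEC =====
def Spec_deBruijnGraph (seq : List String) (out : List (String × List String)) : Prop := out = deBruijnGraph_alt seq
instance (seq : List String) (out : List (String × List String)) : Decidable (Spec_deBruijnGraph seq out) := by unfold Spec_deBruijnGraph; infer_instance

-- ===== CLAIM (what is proved, stated in full; the proofs are below) =====
def Claim_equal_deBruijnGraph : Prop := ∀ (seq : List String), Dom_deBruijnGraph seq → Spec_deBruijnGraph seq (deBruijnGraph seq)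

-- ===== LEMMAS AND PROOFS =====

-- A's branchy loop body is one uniform 'modify': inserting [] at an absent key and
-- then modifying it is the same as modifying with default [].
theorem deBruijn_step_eq (d : PySem.Dict String (List String)) (pre suf : String) :
    (if !(d.contains pre) then
        ((d.insert pre ([] : List String)).modify pre [] (fun l => l ++ [suf]))
      else
        d.modify pre [] (fun l => l ++ [suf]))
    = d.modify pre [] (fun l => l ++ [suf]) := by
  by_cases h : d.contains pre
  · simp [h]
  · have h' : d.contains pre = false := by simpa using h
    simp [h', PySem.Dict.modify, PySem.Dict.insert_insert_self,
      PySem.Dict.getD_insert_self, PySem.Dict.getD_of_not_contains _ _ h']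

-- The uniform modify-loop over (prefix, suffix) pairs, characterised: its items are
-- the deduped keys paired with their gathered values.
theorem deBruijn_fold_items (l : List (String × String)) :
    ((l.foldl (fun d p => d.modify p.1 [] (fun x => x ++ [p.2])) PySem.Dict.empty)).items
    = (PySem.List.dedup (l.map (fun p => p.1))).map
        (fun c => (c, (l.filter (fun p => p.1 == c)).map (fun p => p.2))) := by
  have hnd := PySem.Dict.nodup_keys_foldl_modify_key l (fun p => p.1) []
      (fun _ p x => x ++ [p.2]) PySem.Dict.empty (by simp)
  have hk := PySem.Dict.keys_foldl_modify_key l (fun p => p.1) []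
      (fun _ p x => x ++ [p.2]) PySem.Dict.empty
  beta_reduce at hnd hk
  rw [PySem.Dict.items_eq_map_keys _ hnd [], hk]
  have : PySem.Set.update (PySem.Dict.empty : PySem.Dict String (List String)).keys
      (l.map (fun p => p.1)) = PySem.List.dedup (l.map (fun p => p.1)) := by
    simp [PySem.Set.update, PySem.Set.ofList_eq_foldl, PySem.Dict.keys, PySem.Dict.empty]
  rw [this]
  apply List.map_congr_left
  intro c hc
  rw [PySem.Dict.getD_foldl_modify_append]
  simp

theorem deBruijnGraph_spec : Claim_equal_deBruijnGraph := by
  intro seq _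
  unfold Spec_deBruijnGraph deBruijnGraph deBruijnGraph_alt
  simp only [deBruijn_step_eq]
  have hb := List.foldl_map
      (f := fun m => (PySem.Str.slice m none (some (-1)), PySem.Str.slice m (some 1) none))
      (g := fun d p => PySem.Dict.modify d p.1 [] (fun x => x ++ [p.2]))
      (l := seq) (init := PySem.Dict.empty)
  beta_reduce at hb
  rw [← hb]
  rw [deBruijn_fold_items]
  simp [List.filter_map, Function.comp_def]
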